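-- pv_equiv track=rewrite | github.com/HANASupervisor/statistic_study | EmploymenStudy/TaeYoung_Yoo/011_QueueAndCircularQueue/2_Mychew.py | Mychew
-- ===== SOURCE A (Python) =====
-- def Mychew(total_count):
--
--     queue = []
--     queue.append((1,1))
--
--     next_person = 2
--     # 마이쮸 남아있으면 계속 나눠줘 떨어질때까지
--     while total_count > 0:
--         # 큐에서 뽑아서 첫번째는 사람 두번째는 받는 마이쭈개수임
--         person, cnt = queue.pop(0)
--         # 만약 남은 마이쮸개수가 그사람이 받아야하는 마이쮸의 개수보다 작거나 같으면 그사람이 마이쮸를 받는 마지막사람임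
--         if total_count - cnt <= 0:
--             return person
--
--         # 마이쮸 나눠줘야함
--         total_count -= cnt
--
--         # 마이쮸받고나면 받은 사람이 다시 줄서기시작함
--         queue.append((person, cnt + 1))
--
--         # 그리고 그걸본 다른 사람들이 호다닥 따라서 줄서기 시작함
--         queue.append((next_person, 1))
-- ===== SOURCE B (Python) =====
-- def Mychew(total_count):
--     # Binary search for the first pop step K at which the cumulative number of
--     # candies handed out, S(K) = 2*K - popcount(K), reaches total_count; the
--     # recipient is person 1 exactly when K is a power of two, else person 2.
--     n = total_count
--     lo, hi = 1, n
--     while lo < hi: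
--         mid = (lo + hi) // 2
--         if 2 * mid - mid.bit_count() >= n:
--             hi = mid
--         else:
--             lo = mid + 1
--     m = lo
--     while m % 2 == 0:
--         m //= 2
--     return 1 if m == 1 else 2
-- ===== Notes on version B (the rewrite author's own statement) =====
-- stated objective: faster
-- what changed: Replaces the queue simulation (pop(0)/append per candy round) by a closed-form characterisation: the k-th pop hands out v2(k)+1 candies (cumulative 2k - popcount(k)) and goes to person 1 iff k is a power of two, so B binary-searches the first k with 2k - popcount(k) >= total_count.
-- outside the precondition, e.g. on Mychew(0): A returns None, B returns 1; on Mychew(-3): A returns None, B returns 1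
import Mathlib
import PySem

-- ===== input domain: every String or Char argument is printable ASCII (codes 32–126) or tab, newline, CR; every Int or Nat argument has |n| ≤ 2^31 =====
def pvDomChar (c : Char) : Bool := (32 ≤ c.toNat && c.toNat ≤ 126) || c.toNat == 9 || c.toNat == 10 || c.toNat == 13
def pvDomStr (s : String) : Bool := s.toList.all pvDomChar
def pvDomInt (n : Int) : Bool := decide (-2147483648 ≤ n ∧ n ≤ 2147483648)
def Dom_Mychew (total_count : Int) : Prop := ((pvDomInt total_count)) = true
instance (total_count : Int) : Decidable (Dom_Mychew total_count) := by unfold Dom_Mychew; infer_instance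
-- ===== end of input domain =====

-- B replaces A's queue simulation (pop(0)/append per round) by a binary search for the
-- first pop step k with 2k - popcount(k) ≥ total_count (the cumulative candies after k
-- pops); faster.

-- ===== PORT A =====
-- the while loop: fuel = total_count.toNat suffices because every iteration removes
-- cnt ≥ 1 candies (fuel is a totality guard only; the sentinel 0 branches are the
-- unreachable 'loop exits / empty queue' cases, excluded by Pre_).
def Aloop : Nat → Int → List (Int × Int) → Int → Int
  | 0, _, _, _ => 0
  | fuel + 1, t, q, np =>
    if 0 < t then
      match q with
      | [] => 0
      | (p, c) :: rest =>
        if t - c ≤ 0 then p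
        else Aloop fuel (t - c) (rest ++ [(p, c + 1), (np, 1)]) np
    else 0

def Mychew (total_count : Int) : Int :=
  Aloop total_count.toNat total_count [(1, 1)] 2

-- ===== PORT B =====
-- binary search: while lo < hi: mid = (lo+hi)//2; if 2*mid - mid.bit_count() >= n: hi = mid else lo = mid+1
def Bsearch (n lo hi : Int) : Int :=
  if h : lo < hi then
    if n ≤ 2 * PySem.Int.floordiv (lo + hi) 2
          - (PySem.Int.bitCount (PySem.Int.floordiv (lo + hi) 2) : Int)
    then Bsearch n lo (PySem.Int.floordiv (lo + hi) 2)
    else Bsearch n (PySem.Int.floordiv (lo + hi) 2 + 1) hi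
  else lo
termination_by (hi - lo).toNat
decreasing_by
  · have hb := PySem.Int.floordiv_two_mid_bounds (le_of_lt h)
    have hlt : PySem.Int.floordiv (lo + hi) 2 < hi := by
      rw [PySem.Int.floordiv_lt_iff_lt_mul (by omega : (0:Int) < 2)]; omega
    omega
  · have hb := PySem.Int.floordiv_two_mid_bounds (le_of_lt h)
    omega

-- while m % 2 == 0: m //= 2   (the 0 < m guard only makes the recursion total;
-- B calls it with m ≥ 1 only, where Python's loop terminates)
def oddify (m : Int) : Int :=
  if h : 0 < m ∧ PySem.Int.mod m 2 = 0 then oddify (PySem.Int.floordiv m 2) else m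
termination_by m.toNat
decreasing_by
  have h2 : PySem.Int.floordiv m 2 = m / 2 := PySem.Int.floordiv_eq_ediv_of_pos (by omega)
  omega

def Mychew_alt (total_count : Int) : Int :=
  let n := total_count
  let m := oddify (Bsearch n 1 n)
  if m = 1 then 1 else 2

-- ===== PRECONDITION & SPEC =====
-- Pre_ excludes non-positive total_count, on which A's while loop never runs and
-- Python returns None (no Int value); B returns an ordinary Int there.
def Pre_Mychew (total_count : Int) : Prop := 1 ≤ total_count
instance (total_count : Int) : Decidable (Pre_Mychew total_count) := by unfold Pre_Mychew; infer_instance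
def pvWitness_Mychew : Int := (5)

def Spec_Mychew (total_count : Int) (out : Int) : Prop := out = Mychew_alt total_count
instance (total_count : Int) (out : Int) : Decidable (Spec_Mychew total_count out) := by unfold Spec_Mychew; infer_instance

-- ===== CLAIM (what is proved, stated in full; the proofs are below) =====
def Claim_equal_Mychew : Prop := ∀ (total_count : Int), Dom_Mychew total_count → Pre_Mychew total_count → Spec_Mychew total_count (Mychew total_count)

-- ===== LEMMAS AND PROOFS =====

-- candies handed out at the k-th pop: v2(k) + 1
def cnt (k : Nat) : Nat :=
  if k < 2 then 1 else if k % 2 = 1 then 1 else cnt (k / 2) + 1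
termination_by k
decreasing_by omega

-- recipient of the k-th pop: 1 iff k is a power of two, else 2
def person (k : Nat) : Int :=
  if k ≤ 1 then 1 else if k % 2 = 1 then 2 else person (k / 2)
termination_by k
decreasing_by omega

-- cumulative candies after k pops
def S : Nat → Nat
  | 0 => 0
  | k + 1 => S k + cnt (k + 1)

lemma cnt_pos (k : Nat) : 1 ≤ cnt k := by
  fun_induction cnt k <;> omega

-- index of the first pop at which remaining t is exhausted, scanning from k
def lK (k t : Nat) : Nat :=
  if t ≤ cnt k then k else lK (k + 1) (t - cnt k)
termination_by t
decreasing_by have := cnt_pos k; omega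

lemma cnt_one : cnt 1 = 1 := by rw [cnt]; norm_num

lemma cnt_odd (k : Nat) : cnt (2 * k + 1) = 1 := by
  rw [cnt]
  split_ifs with h1 h2
  · rfl
  · rfl
  · omega

lemma cnt_even (k : Nat) (hk : 1 ≤ k) : cnt (2 * k) = cnt k + 1 := by
  rw [cnt]
  split_ifs with h1 h2
  · omega
  · omega
  · have : 2 * k / 2 = k := by omega
    rw [this]

lemma person_one : person 1 = 1 := by rw [person]; norm_num

lemma person_odd (k : Nat) (hk : 1 ≤ k) : person (2 * k + 1) = 2 := by
  rw [person]
  split_ifs with h1 h2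
  · omega
  · rfl
  · omega

lemma person_even (k : Nat) (hk : 1 ≤ k) : person (2 * k) = person k := by
  rw [person]
  split_ifs with h1 h2
  · omega
  · omega
  · have : 2 * k / 2 = k := by omega
    rw [this]

-- the queue at the start of the k-th iteration: pops k .. 2k-1, front first
def window (k : Nat) : List (Int × Int) :=
  (List.range' k k).map (fun j => (person j, (cnt j : Int)))

lemma window_step (m : Nat) :
    (List.range' (m + 2) m).map (fun j => (person j, (cnt j : Int)))
      ++ [(person (m + 1), (cnt (m + 1) : Int) + 1), (2, 1)] = window (m + 2) := by
  have hr : List.range' (m + 2) m ++ List.range' (2 * m + 2) 2 = List.range' (m + 2) (m + 2) := by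
    have h := @List.range'_append (m + 2) m 2 1
    rw [show m + 2 + 1 * m = 2 * m + 2 by omega] at h
    exact h
  have h2 : List.range' (2 * m + 2) 2 = [2 * m + 2, 2 * m + 3] := by
    simp [List.range'_succ]
  have he : person (2 * m + 2) = person (m + 1) ∧ cnt (2 * m + 2) = cnt (m + 1) + 1 := by
    have h1 : 2 * m + 2 = 2 * (m + 1) := by omega
    rw [h1, person_even (m + 1) (by omega), cnt_even (m + 1) (by omega)]
    exact ⟨rfl, rfl⟩
  have ho : person (2 * m + 3) = 2 ∧ cnt (2 * m + 3) = 1 := by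
    have h1 : 2 * m + 3 = 2 * (m + 1) + 1 := by omega
    rw [h1, person_odd (m + 1) (by omega), cnt_odd (m + 1)]
    exact ⟨rfl, rfl⟩
  calc (List.range' (m + 2) m).map (fun j => (person j, (cnt j : Int)))
        ++ [(person (m + 1), (cnt (m + 1) : Int) + 1), (2, 1)]
      = (List.range' (m + 2) m ++ List.range' (2 * m + 2) 2).map
          (fun j => (person j, (cnt j : Int))) := by
        rw [List.map_append, h2]
        simp [he.1, he.2, ho.1, ho.2]
    _ = window (m + 2) := by rw [hr]; rfl

-- A's loop on window k with remaining t returns the person of pop lK k t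
lemma loopA : ∀ (fuel t k : Nat), 1 ≤ k → 1 ≤ t → t ≤ fuel →
    Aloop fuel (t : Int) (window k) 2 = person (lK k t) := by
  intro fuel
  induction fuel with
  | zero => intro t k _ ht hf; omega
  | succ fuel ih =>
    intro t k hk ht hf
    obtain ⟨m, rfl⟩ : ∃ m, k = m + 1 := ⟨k - 1, by omega⟩
    have hw : window (m + 1)
        = (person (m + 1), (cnt (m + 1) : Int))
          :: (List.range' (m + 2) m).map (fun j => (person j, (cnt j : Int))) := by
      unfold window
      rw [List.range'_succ, List.map_cons]
    rw [hw]
    have ht0 : (0 : Int) < (t : Nat) := by exact_mod_cast ht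
    simp only [Aloop, if_pos ht0]
    by_cases hc : t ≤ cnt (m + 1)
    · have hle : (t : Int) - (cnt (m + 1) : Nat) ≤ 0 := by omega
      rw [if_pos hle, lK, if_pos hc]
    · have hlt : ¬ ((t : Int) - (cnt (m + 1) : Nat) ≤ 0) := by omega
      rw [if_neg hlt, window_step m]
      have hcp := cnt_pos (m + 1)
      have hcast : (t : Int) - (cnt (m + 1) : Nat) = ((t - cnt (m + 1) : Nat) : Int) := by
        omega
      rw [hcast, ih (t - cnt (m + 1)) (m + 2) (by omega) (by omega) (by omega)]
      conv_rhs => rw [lK]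
      rw [if_neg hc]

lemma lK_ge (k t : Nat) : k ≤ lK k t := by
  fun_induction lK k t <;> omega

lemma lK_hit : ∀ (t k : Nat), 1 ≤ t → S k + t ≤ S (lK (k + 1) t) := by
  intro t
  induction t using Nat.strong_induction_on with
  | _ t ih =>
    intro k ht
    rw [lK]
    by_cases hc : t ≤ cnt (k + 1)
    · rw [if_pos hc]; simp only [S]; omega
    · rw [if_neg hc]
      have hcp := cnt_pos (k + 1)
      have := ih (t - cnt (k + 1)) (by omega) (k + 1) (by omega)
      simp only [S] at this ⊢; omega

lemma lK_min : ∀ (t k j : Nat), 1 ≤ t → k + 1 ≤ j → j < lK (k + 1) t → S j < S k + t := by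
  intro t
  induction t using Nat.strong_induction_on with
  | _ t ih =>
    intro k j ht hj hlt
    rw [lK] at hlt
    by_cases hc : t ≤ cnt (k + 1)
    · rw [if_pos hc] at hlt; omega
    · rw [if_neg hc] at hlt
      have hcp := cnt_pos (k + 1)
      rcases Nat.eq_or_lt_of_le hj with h | h
      · subst h; simp only [S]; omega
      · have := ih (t - cnt (k + 1)) (by omega) (k + 1) j (by omega) (by omega) hlt
        simp only [S] at this ⊢; omega

-- bitCount interplay: popcount(k+1) + cnt(k+1) = popcount(k) + 2
lemma bc_cnt (k : Nat) :
    PySem.Int.bitCount ((k + 1 : Nat) : Int) + cnt (k + 1)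
      = PySem.Int.bitCount ((k : Nat) : Int) + 2 := by
  induction k using Nat.strong_induction_on with
  | _ k ih =>
    by_cases hk : k % 2 = 0
    · have hodd : cnt (k + 1) = 1 := by
        have h : k + 1 = 2 * ((k + 1) / 2) + 1 := by omega
        rw [h, cnt_odd]
      rw [hodd]
      rcases Nat.eq_zero_or_pos k with h0 | h0
      · subst h0
        decide
      · rw [PySem.Int.bitCount_natCast (m := k + 1) (by omega),
            PySem.Int.bitCount_natCast (m := k) h0]
        have h : (k + 1) / 2 = k / 2 := by omega
        rw [h]; omega
    · -- k odd: k = 2m+1, k+1 = 2(m+1)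
      obtain ⟨m, rfl⟩ : ∃ m, k = 2 * m + 1 := ⟨k / 2, by omega⟩
      have hce : cnt (2 * m + 1 + 1) = cnt (m + 1) + 1 := by
        have h : 2 * m + 1 + 1 = 2 * (m + 1) := by omega
        rw [h, cnt_even (m + 1) (by omega)]
      rw [hce]
      rw [PySem.Int.bitCount_natCast (m := 2 * m + 1 + 1) (by omega),
          PySem.Int.bitCount_natCast (m := 2 * m + 1) (by omega)]
      have h1 : (2 * m + 1 + 1) / 2 = m + 1 := by omega
      have h2 : (2 * m + 1) / 2 = m := by omega
      rw [h1, h2]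
      have := ih m (by omega)
      omega

lemma S_eq (k : Nat) : S k + PySem.Int.bitCount ((k : Nat) : Int) = 2 * k := by
  induction k with
  | zero =>
    decide
  | succ k ih =>
    have := bc_cnt k
    simp only [S]; omega

lemma S_ge (k : Nat) : k ≤ S k := by
  induction k with
  | zero => simp [S]
  | succ k ih => have := cnt_pos (k + 1); simp only [S]; omega

lemma S_mono {i j : Nat} (h : i ≤ j) : S i ≤ S j := by
  induction j, h using Nat.le_induction with
  | base => exact le_refl _
  | succ j hij ih => simp only [S]; omega

-- binary search returns the unique K with P K ∧ ∀ 1 ≤ j < K, ¬ P j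
lemma bsearch_eq (n : Int) (K : Nat) (hK1 : 1 ≤ K)
    (hPK : n ≤ 2 * (K : Int) - (PySem.Int.bitCount (K : Int) : Int))
    (hmin : ∀ j : Nat, 1 ≤ j → j < K → ¬ (n ≤ 2 * (j : Int) - (PySem.Int.bitCount (j : Int) : Int))) :
    ∀ lo hi : Int, 1 ≤ lo → lo ≤ (K : Int) → (K : Int) ≤ hi → Bsearch n lo hi = (K : Int) := by
  have main : ∀ μ : Nat, ∀ lo hi : Int, (hi - lo).toNat = μ → 1 ≤ lo → lo ≤ (K : Int) →
      (K : Int) ≤ hi → Bsearch n lo hi = (K : Int) := by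
    intro μ
    induction μ using Nat.strong_induction_on with
    | _ μ ih =>
      intro lo hi hμ h1 hloK hKhi
      rw [Bsearch]
      by_cases h : lo < hi
      · rw [dif_pos h]
        have hb := PySem.Int.floordiv_two_mid_bounds (le_of_lt h)
        have hlt : PySem.Int.floordiv (lo + hi) 2 < hi := by
          rw [PySem.Int.floordiv_lt_iff_lt_mul (by omega : (0:Int) < 2)]; omega
        set md := PySem.Int.floordiv (lo + hi) 2 with hmd
        by_cases hP : n ≤ 2 * md - (PySem.Int.bitCount md : Int)
        · rw [if_pos hP]
          have hKm : (K : Int) ≤ md := by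
            by_contra hcon
            have hm1 : 1 ≤ md := by omega
            have heq : md = ((md.toNat : Nat) : Int) := by omega
            rw [heq] at hP
            exact hmin md.toNat (by omega) (by omega) hP
          exact ih (md - lo).toNat (by omega) lo md rfl h1 hloK hKm
        · rw [if_neg hP]
          have hmK : md < (K : Int) := by
            by_contra hcon
            apply hP
            have hKm : (K : Int) ≤ md := by omega
            have hmn : md = ((md.toNat : Nat) : Int) := by omega
            rw [hmn]
            have hSK := S_eq K
            have hSm := S_eq md.toNat
            have hmono : S K ≤ S md.toNat := S_mono (by omega)
            omega
          exact ih (hi - (md + 1)).toNat (by omega) (md + 1) hi rfl (by omega) (by omega) hKhi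
      · rw [dif_neg h]
        omega
  intro lo hi h1 h2 h3
  exact main (hi - lo).toNat lo hi rfl h1 h2 h3

lemma oddify_person : ∀ k : Nat, 1 ≤ k →
    (if oddify ((k : Nat) : Int) = 1 then (1 : Int) else 2) = person k := by
  intro k
  induction k using Nat.strong_induction_on with
  | _ k ih =>
    intro hk
    rw [oddify, person]
    have hmod : PySem.Int.mod ((k : Nat) : Int) 2 = ((k % 2 : Nat) : Int) := by
      exact_mod_cast PySem.Int.mod_natCast k 2
    have hdiv : PySem.Int.floordiv ((k : Nat) : Int) 2 = ((k / 2 : Nat) : Int) := by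
      exact_mod_cast PySem.Int.floordiv_natCast k 2
    rw [hmod, hdiv]
    by_cases he : k % 2 = 0
    · have h1 : ¬ k ≤ 1 := by omega
      have h2 : ¬ k % 2 = 1 := by omega
      have hcond : (0 : Int) < ((k : Nat) : Int) ∧ ((k % 2 : Nat) : Int) = 0 := by
        constructor
        · exact_mod_cast hk
        · exact_mod_cast he
      rw [dif_pos hcond]
      simp only [h1, h2, if_false]
      exact ih (k / 2) (by omega) (by omega)
    · have hcond : ¬ ((0 : Int) < ((k : Nat) : Int) ∧ ((k % 2 : Nat) : Int) = 0) := by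
        rintro ⟨-, hz⟩
        have : k % 2 = 0 := by exact_mod_cast hz
        omega
      rw [dif_neg hcond]
      by_cases h1 : k ≤ 1
      · have : k = 1 := by omega
        subst this; norm_num
      · have h2 : k % 2 = 1 := by omega
        have hne : ((k : Nat) : Int) ≠ 1 := by omega
        simp [hne, h1, h2]

-- ===== VERDICT (by name: the statement is the Claim_ definition above) =====
theorem Mychew_spec : Claim_equal_Mychew := by
  intro tc _ hpre
  unfold Spec_Mychew
  have hpre : 1 ≤ tc := hpre
  set tn := tc.toNat with htn
  have htc : tc = ((tn : Nat) : Int) := by omega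
  set K := lK 1 tn with hKdef
  have hK1 : 1 ≤ K := lK_ge 1 tn
  have hhit : tn ≤ S K := by
    have := lK_hit tn 0 (by omega)
    simpa [S] using this
  have hmin : ∀ j : Nat, 1 ≤ j → j < K → S j < tn := by
    intro j hj hjK
    have := lK_min tn 0 j (by omega) hj hjK
    simpa [S] using this
  have hKtn : K ≤ tn := by
    by_contra hcon
    have h1 := hmin tn (by omega) (by omega)
    have h2 := S_ge tn
    omega
  -- A side
  have hwin : ([((1 : Int), (1 : Int))]) = window 1 := by
    unfold window
    simp [List.range'_succ, person_one, cnt_one]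
  have hA : Mychew tc = person K := by
    unfold Mychew
    rw [← htn, htc, hwin]
    exact loopA tn tn 1 (by omega) (by omega) (by omega)
  -- B side
  have hPK : tc ≤ 2 * (K : Int) - (PySem.Int.bitCount (K : Int) : Int) := by
    have h1 := S_eq K
    have h2 : ((tn : Nat) : Int) ≤ (S K : Int) := by exact_mod_cast hhit
    omega
  have hPmin : ∀ j : Nat, 1 ≤ j → j < K →
      ¬ (tc ≤ 2 * (j : Int) - (PySem.Int.bitCount (j : Int) : Int)) := by
    intro j hj hjK hcon
    have hSj := S_eq j
    have := hmin j hj hjK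
    omega
  have hB : Mychew_alt tc = if oddify (Bsearch tc 1 tc) = 1 then 1 else 2 := rfl
  have hBs : Bsearch tc 1 tc = (K : Int) :=
    bsearch_eq tc K hK1 hPK hPmin 1 tc (by omega) (by exact_mod_cast hK1) (by omega)
  rw [hA, hB, hBs]
  exact (oddify_person K hK1).symm
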